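-- pv_equiv track=rewrite | github.com/SakiNana7qi/Master-Ichihime | mahjong_environment/utils/tile_utils.py | format_hand
-- ===== SOURCE A (Python) =====
-- from typing import List
--
-- def tile_to_unicode(tile: str) -> str:
--     """
--     将牌的字符串表示转换为Unicode字符（用于美化显示）
--
--     Args:
--         tile: 牌的字符串表示 (如 "1m", "5z")
--
--     Returns:
--         str: Unicode字符
--     """
--     if len(tile) != 2:
--         return tile
--
--     num = tile[0]
--     suit = tile[1]
--
--     # Unicode麻将牌范围: U+1F000 - U+1F02F
--     # 但这些字符在很多终端中显示不正确，暂时使用文字表示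
--
--     suit_names = {"m": "万", "p": "筒", "s": "索", "z": ""}
--
--     if suit == "z":
--         honor_names = {
--             "1": "东",
--             "2": "南",
--             "3": "西",
--             "4": "北",
--             "5": "白",
--             "6": "发",
--             "7": "中",
--         }
--         return honor_names.get(num, tile)
--     elif num == "0":
--         return f"赤5{suit_names[suit]}"
--     else:
--         return f"{num}{suit_names[suit]}"
--
-- def format_hand(tiles: List[str], show_unicode: bool = False) -> str:
--     """
--     格式化显示手牌
--
--     Args:
--         tiles: 牌的列表
--         show_unicode: 是否使用Unicode显示
--
--     Returns:
--         str: 格式化后的字符串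
--     """
--     if not tiles:
--         return "[]"
--
--     if show_unicode:
--         return " ".join([tile_to_unicode(t) for t in tiles])
--     else:
--         # 按花色分组显示
--         manzu = [t for t in tiles if t.endswith("m")]
--         pinzu = [t for t in tiles if t.endswith("p")]
--         souzu = [t for t in tiles if t.endswith("s")]
--         honors = [t for t in tiles if t.endswith("z")]
--
--         result = []
--         if manzu:
--             result.append("".join([t[0] for t in sorted(manzu)]) + "m")
--         if pinzu:
--             result.append("".join([t[0] for t in sorted(pinzu)]) + "p")
--         if souzu:
--             result.append("".join([t[0] for t in sorted(souzu)]) + "s")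
--         if honors:
--             result.append("".join([t[0] for t in sorted(honors)]) + "z")
--
--         return " ".join(result)
-- ===== SOURCE B (Python) =====
-- _HONORS = "东南西北白发中"
--
--
-- def tile_to_unicode(tile: str) -> str:
--     if len(tile) != 2:
--         return tile
--     num, suit = tile[0], tile[1]
--     if suit == "z":
--         return _HONORS[int(num) - 1] if num in "1234567" else tile
--     name = {"m": "万", "p": "筒", "s": "索"}[suit]
--     return "赤5" + name if num == "0" else num + name
--
--
-- def format_hand(tiles, show_unicode=False):
--     if not tiles:
--         return "[]"
--     if show_unicode:
--         return " ".join(tile_to_unicode(t) for t in tiles)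
--     # Counting sort: only each tile's FIRST character reaches the output, so a
--     # histogram of first characters per suit suffices.  Lexicographic order on
--     # the full tile strings of one suit agrees with the order of their first
--     # characters whenever those differ, and ties contribute identical output
--     # characters — so emitting each recorded character in ascending code order,
--     # repeated by its count, reproduces sorted()'s output without sorting tiles.
--     counts = {"m": {}, "p": {}, "s": {}, "z": {}}
--     for t in tiles:
--         suit = t[-1:]
--         if suit in counts:
--             c = counts[suit]
--             c[t[0]] = c.get(t[0], 0) + 1
--     parts = []
--     for suit in "mpsz":
--         c = counts[suit]
--         if c:
--             parts.append("".join(ch * c[ch] for ch in sorted(c)) + suit)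
--     return " ".join(parts)
-- ===== Notes on version B (the rewrite author's own statement) =====
-- stated objective: alternative
-- what changed: B replaces A's per-suit comparison sorts with a counting sort: one pass builds a histogram of first characters per suit (only the first character ever reaches the output), and each suit's string is emitted by walking the recorded characters in ascending code order repeated by count, so the tile lists are never sorted; tile_to_unicode's honor dict also becomes a direct string-index lookup.
import Mathlib
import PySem

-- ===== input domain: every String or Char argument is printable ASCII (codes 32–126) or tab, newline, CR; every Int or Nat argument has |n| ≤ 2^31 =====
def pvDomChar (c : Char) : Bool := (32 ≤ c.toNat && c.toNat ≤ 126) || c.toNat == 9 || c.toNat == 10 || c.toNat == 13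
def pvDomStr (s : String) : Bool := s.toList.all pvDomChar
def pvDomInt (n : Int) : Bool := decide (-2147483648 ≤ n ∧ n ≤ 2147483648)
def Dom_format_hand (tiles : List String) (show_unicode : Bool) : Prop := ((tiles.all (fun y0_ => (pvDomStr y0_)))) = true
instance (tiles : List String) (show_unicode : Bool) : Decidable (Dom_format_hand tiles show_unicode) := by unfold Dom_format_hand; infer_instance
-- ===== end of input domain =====

-- B replaces A's per-suit comparison sorts by a counting sort: one pass histograms the first
-- characters per suit and each suit's string is emitted in ascending character order by count.

-- ===== PORT A =====
-- helper tile_to_unicode, transliterated from Source A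
def tile_to_unicode (tile : String) : String :=
  if tile.toList.length ≠ 2 then tile
  else
    let num : Char := tile.toList.getD 0 ' '    -- tile[0], in range: length = 2
    let suit : Char := tile.toList.getD 1 ' '   -- tile[1]
    -- suit_names = {"m": "万", "p": "筒", "s": "索", "z": ""} (values as List Char)
    let suit_names : PySem.Dict Char (List Char) :=
      PySem.Dict.ofList [('m', ['万']), ('p', ['筒']), ('s', ['索']), ('z', [])]
    if suit = 'z' then
      -- honor_names.get(num, tile)
      (PySem.Dict.ofList [('1', "东"), ('2', "南"), ('3', "西"), ('4', "北"),
                          ('5', "白"), ('6', "发"), ('7', "中")]).getD num tile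
    else if num = '0' then
      -- f"赤5{suit_names[suit]}"; a missing key raises KeyError in Python — excluded by Pre_
      String.ofList (['赤', '5'] ++ suit_names.getD suit [])
    else
      String.ofList ([num] ++ suit_names.getD suit [])

-- "".join([t[0] for t in sorted(x)]) + suit — t[0] in range: every t in x ends in the suit letter
def pvGroupStr (x : List String) (c : Char) : String :=
  String.ofList (((PySem.List.sorted x (fun t => t) false).map (fun t => t.toList.getD 0 ' ')) ++ [c])

def format_hand (tiles : List String) (show_unicode : Bool) : String :=
  if tiles = [] then "[]"
  else if show_unicode then
    PySem.Str.join " " (tiles.map tile_to_unicode)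
  else
    let manzu := tiles.filter (fun t => PySem.Str.endswith t "m")
    let pinzu := tiles.filter (fun t => PySem.Str.endswith t "p")
    let souzu := tiles.filter (fun t => PySem.Str.endswith t "s")
    let honors := tiles.filter (fun t => PySem.Str.endswith t "z")
    let result : List String := []
    let result := if manzu ≠ [] then result ++ [pvGroupStr manzu 'm'] else result
    let result := if pinzu ≠ [] then result ++ [pvGroupStr pinzu 'p'] else result
    let result := if souzu ≠ [] then result ++ [pvGroupStr souzu 's'] else result
    let result := if honors ≠ [] then result ++ [pvGroupStr honors 'z'] else result
    PySem.Str.join " " result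

-- ===== PORT B =====
-- _HONORS = "东南西北白发中"
def pvHonors : List Char := ['东', '南', '西', '北', '白', '发', '中']

-- helper tile_to_unicode, transliterated from Source B
def tile_to_unicode_alt (tile : String) : String :=
  if tile.toList.length ≠ 2 then tile
  else
    let num : Char := tile.toList.getD 0 ' '    -- tile[0], in range: length = 2
    let suit : Char := tile.toList.getD 1 ' '   -- tile[1]
    if suit = 'z' then
      -- _HONORS[int(num)-1] if num in "1234567" else tile ; index in range under the guard
      if num ∈ "1234567".toList then
        String.ofList [pvHonors.getD (((PySem.Int.ofChars? [num]).getD 0).toNat - 1) ' ']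
      else tile
    else
      -- {"m": "万", "p": "筒", "s": "索"}[suit]; a missing key raises KeyError — excluded by Pre_
      let name : List Char :=
        (PySem.Dict.ofList [('m', ['万']), ('p', ['筒']), ('s', ['索'])]).getD suit []
      if num = '0' then String.ofList (['赤', '5'] ++ name)
      else String.ofList ([num] ++ name)

-- loop body: suit = t[-1:]; if suit in counts: c = counts[suit]; c[t[0]] = c.get(t[0], 0) + 1
def pvCountStep (d : PySem.Dict String (PySem.Dict Char Int)) (t : String) :
    PySem.Dict String (PySem.Dict Char Int) :=
  let suit := PySem.Str.slice t (some (-1)) none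
  if d.contains suit then
    d.modify suit PySem.Dict.empty (fun c => c.modify (t.toList.getD 0 ' ') 0 (· + 1))
  else d

-- "".join(ch * c[ch] for ch in sorted(c)) + suit — emit each counted char in ascending order
def pvEmit (c : PySem.Dict Char Int) (suit : String) : String :=
  String.ofList ((PySem.List.sorted c.keys (fun x => x) false).flatMap
    (fun ch => PySem.List.pyRepeat [ch] (c.getD ch 0)) ++ suit.toList)

def format_hand_alt (tiles : List String) (show_unicode : Bool) : String :=
  if tiles = [] then "[]"
  else if show_unicode then
    PySem.Str.join " " (tiles.map tile_to_unicode_alt)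
  else
    let counts := tiles.foldl pvCountStep
      (PySem.Dict.ofList [("m", PySem.Dict.empty), ("p", PySem.Dict.empty),
                          ("s", PySem.Dict.empty), ("z", PySem.Dict.empty)])
    let parts := (["m", "p", "s", "z"] : List String).foldl (fun parts suit =>
      let c := counts.getD suit PySem.Dict.empty
      if c.size ≠ 0 then parts ++ [pvEmit c suit] else parts) []
    PySem.Str.join " " parts

-- ===== PRECONDITION & SPEC =====
-- Pre_ excludes exactly the inputs on which Python A RAISES (KeyError): show_unicode = true with a
-- two-character tile whose second character is not one of m/p/s/z.
def Pre_format_hand (tiles : List String) (show_unicode : Bool) : Prop :=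
  show_unicode = true → ∀ t ∈ tiles, t.toList.length = 2 →
    t.toList.getD 1 ' ' ∈ (['m', 'p', 's', 'z'] : List Char)
instance (tiles : List String) (show_unicode : Bool) : Decidable (Pre_format_hand tiles show_unicode) := by
  unfold Pre_format_hand; infer_instance

def pvWitness_format_hand : List String × Bool := (["1m", "9p", "5z"], true)

def Spec_format_hand (tiles : List String) (show_unicode : Bool) (out : String) : Prop := out = format_hand_alt tiles show_unicode
instance (tiles : List String) (show_unicode : Bool) (out : String) : Decidable (Spec_format_hand tiles show_unicode out) := by unfold Spec_format_hand; infer_instance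

-- ===== CLAIM (what is proved, stated in full; the proofs are below) =====
def Claim_equal_format_hand : Prop := ∀ (tiles : List String) (show_unicode : Bool), Dom_format_hand tiles show_unicode → Pre_format_hand tiles show_unicode → Spec_format_hand tiles show_unicode (format_hand tiles show_unicode)

-- ===== LEMMAS AND PROOFS =====

-- the two name dicts (A's has the never-reached 'z' ↦ [] entry) look up the same value
theorem pv_name_eq (s : Char) :
    (PySem.Dict.ofList [('m', ['万']), ('p', ['筒']), ('s', ['索']), ('z', [])] : PySem.Dict Char (List Char)).getD s [] =
    (PySem.Dict.ofList [('m', ['万']), ('p', ['筒']), ('s', ['索'])] : PySem.Dict Char (List Char)).getD s [] := by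
  simp only [show (PySem.Dict.ofList [('m', ['万']), ('p', ['筒']), ('s', ['索']), ('z', [])] : PySem.Dict Char (List Char)) =
      PySem.Dict.mk [('m', ['万']), ('p', ['筒']), ('s', ['索']), ('z', [])] from rfl,
    show (PySem.Dict.ofList [('m', ['万']), ('p', ['筒']), ('s', ['索'])] : PySem.Dict Char (List Char)) =
      PySem.Dict.mk [('m', ['万']), ('p', ['筒']), ('s', ['索'])] from rfl,
    PySem.Dict.getD_eq_get?_getD, PySem.Dict.get?_mk_cons]
  split_ifs <;> rfl

-- the two Python helpers agree on every tile (both ports are total; the KeyError inputs are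
-- represented by the same getD default on both sides)
theorem pv_tile_eq (t : String) : tile_to_unicode t = tile_to_unicode_alt t := by
  unfold tile_to_unicode tile_to_unicode_alt
  by_cases hlen : t.toList.length ≠ 2
  · rw [if_pos hlen, if_pos hlen]
  · rw [if_neg hlen, if_neg hlen]
    by_cases hz : t.toList.getD 1 ' ' = 'z'
    · rw [if_pos hz, if_pos hz]
      by_cases h1 : t.toList.getD 0 ' ' = '1'
      · rw [h1]; rfl
      by_cases h2 : t.toList.getD 0 ' ' = '2'
      · rw [h2]; rfl
      by_cases h3 : t.toList.getD 0 ' ' = '3'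
      · rw [h3]; rfl
      by_cases h4 : t.toList.getD 0 ' ' = '4'
      · rw [h4]; rfl
      by_cases h5 : t.toList.getD 0 ' ' = '5'
      · rw [h5]; rfl
      by_cases h6 : t.toList.getD 0 ' ' = '6'
      · rw [h6]; rfl
      by_cases h7 : t.toList.getD 0 ' ' = '7'
      · rw [h7]; rfl
      · simp only [List.getD_eq_getElem?_getD] at h1 h2 h3 h4 h5 h6 h7
        simp [show (PySem.Dict.ofList [('1', "东"), ('2', "南"), ('3', "西"), ('4', "北"),
            ('5', "白"), ('6', "发"), ('7', "中")] : PySem.Dict Char String) =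
            PySem.Dict.mk [('1', "东"), ('2', "南"), ('3', "西"), ('4', "北"),
            ('5', "白"), ('6', "发"), ('7', "中")] from rfl,
          PySem.Dict.getD_eq_get?_getD, PySem.Dict.get?_mk_cons,
          Ne.symm h1, Ne.symm h2, Ne.symm h3, Ne.symm h4, Ne.symm h5, Ne.symm h6, Ne.symm h7,
          h1, h2, h3, h4, h5, h6, h7]
        rfl
    · rw [if_neg hz, if_neg hz]
      rw [pv_name_eq]

-- "ends with the one-character string ⟨c⟩"  =  "last character is c"
theorem pv_endswith_last (t : String) (c : Char) :
    PySem.Str.endswith t (String.ofList [c]) = (t.toList.getLast? == some c) := by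
  simp [PySem.Str.endswith_eq]
  rw [Bool.eq_iff_iff, PySem.Chars.endswith_iff]
  induction t.toList using List.reverseRecOn with
  | nil => simp
  | append_singleton xs x ih =>
    simp only [List.suffix_concat_iff, List.getLast?_concat, Option.some.injEq, beq_iff_eq]
    constructor
    · rintro (h | ⟨s, hs, -⟩)
      · simp at h
      · rcases s with _ | ⟨y, s⟩
        · simpa using hs.symm
        · simp at hs
    · rintro rfl
      exact Or.inr ⟨[], rfl, List.nil_suffix⟩

-- "t[-1:] equals the one-character key"  =  "last character is c"
theorem pv_slice_last (t : String) (c : Char) :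
    (PySem.Str.slice t (some (-1)) none = String.ofList [c]) ↔ t.toList.getLast? = some c := by
  rw [show (PySem.Str.slice t (some (-1)) none = String.ofList [c]) ↔
        (PySem.Str.slice t (some (-1)) none).toList = [c] from
      ⟨fun h => by simp [h], fun h => by
        have := congrArg String.ofList h
        simpa using this⟩]
  simp only [PySem.Str.toList_slice, PySem.Chars.slice_eq_listSlice,
    PySem.List.slice_some_none, PySem.List.clampIdx_neg_one]
  induction t.toList using List.reverseRecOn with
  | nil => simp
  | append_singleton xs x ih => simp [List.length_append]

-- the counting loop's per-tile step on a literal 4-bucket dict: a hit bumps its suit's histogram …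
theorem pv_step_hit (a b c d : PySem.Dict Char Int) (t : String) :
    (PySem.Str.slice t (some (-1)) none = "m" →
      pvCountStep (PySem.Dict.ofList [("m",a),("p",b),("s",c),("z",d)]) t =
        PySem.Dict.ofList [("m",a.modify (t.toList.getD 0 ' ') 0 (· + 1)),("p",b),("s",c),("z",d)]) ∧
    (PySem.Str.slice t (some (-1)) none = "p" →
      pvCountStep (PySem.Dict.ofList [("m",a),("p",b),("s",c),("z",d)]) t =
        PySem.Dict.ofList [("m",a),("p",b.modify (t.toList.getD 0 ' ') 0 (· + 1)),("s",c),("z",d)]) ∧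
    (PySem.Str.slice t (some (-1)) none = "s" →
      pvCountStep (PySem.Dict.ofList [("m",a),("p",b),("s",c),("z",d)]) t =
        PySem.Dict.ofList [("m",a),("p",b),("s",c.modify (t.toList.getD 0 ' ') 0 (· + 1)),("z",d)]) ∧
    (PySem.Str.slice t (some (-1)) none = "z" →
      pvCountStep (PySem.Dict.ofList [("m",a),("p",b),("s",c),("z",d)]) t =
        PySem.Dict.ofList [("m",a),("p",b),("s",c),("z",d.modify (t.toList.getD 0 ' ') 0 (· + 1))]) := by
  refine ⟨fun h => ?_, fun h => ?_, fun h => ?_, fun h => ?_⟩ <;>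
    (unfold pvCountStep; rw [h]; rfl)

-- … and a miss (last character not a suit letter, or empty tile) leaves the dict unchanged
theorem pv_step_miss (a b c d : PySem.Dict Char Int) (t : String)
    (hm : PySem.Str.slice t (some (-1)) none ≠ "m")
    (hp : PySem.Str.slice t (some (-1)) none ≠ "p")
    (hs : PySem.Str.slice t (some (-1)) none ≠ "s")
    (hz : PySem.Str.slice t (some (-1)) none ≠ "z") :
    pvCountStep (PySem.Dict.ofList [("m",a),("p",b),("s",c),("z",d)]) t =
      PySem.Dict.ofList [("m",a),("p",b),("s",c),("z",d)] := by
  unfold pvCountStep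
  have : (PySem.Dict.ofList [("m",a),("p",b),("s",c),("z",d)]).contains
      (PySem.Str.slice t (some (-1)) none) = false := by
    simp [show PySem.Dict.ofList [("m",a),("p",b),("s",c),("z",d)] =
        PySem.Dict.mk [("m",a),("p",b),("s",c),("z",d)] from rfl,
      PySem.Dict.contains_mk]
    exact ⟨fun h => hm h.symm, fun h => hp h.symm, fun h => hs h.symm, fun h => hz h.symm⟩
  simp [this]

-- first characters of each suit's tiles, in hand order
def pvFirsts (ts : List String) (c : Char) : List Char :=
  (ts.filter (fun t => t.toList.getLast? == some c)).map (fun t => t.toList.getD 0 ' ')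

-- the counting loop, run from any literal 4-histogram dict, adds each suit's first-char counts
theorem pv_fold (ts : List String) (a b c d : PySem.Dict Char Int) :
    ts.foldl pvCountStep (PySem.Dict.ofList [("m", a), ("p", b), ("s", c), ("z", d)]) =
    PySem.Dict.ofList
      [("m", (pvFirsts ts 'm').foldl (fun h ch => h.modify ch 0 (· + 1)) a),
       ("p", (pvFirsts ts 'p').foldl (fun h ch => h.modify ch 0 (· + 1)) b),
       ("s", (pvFirsts ts 's').foldl (fun h ch => h.modify ch 0 (· + 1)) c),
       ("z", (pvFirsts ts 'z').foldl (fun h ch => h.modify ch 0 (· + 1)) d)] := by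
  induction ts generalizing a b c d with
  | nil => simp [pvFirsts]
  | cons t ts ih =>
    have hchar : ∀ ch : Char, PySem.Str.slice t (some (-1)) none = String.ofList [ch] ↔
        t.toList.getLast? = some ch := fun ch => pv_slice_last t ch
    by_cases hm : t.toList.getLast? = some 'm'
    · rw [List.foldl_cons, (pv_step_hit a b c d t).1 ((hchar 'm').mpr hm), ih]
      simp [pvFirsts, hm]
    · by_cases hp : t.toList.getLast? = some 'p'
      · rw [List.foldl_cons, (pv_step_hit a b c d t).2.1 ((hchar 'p').mpr hp), ih]
        simp [pvFirsts, hp]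
      · by_cases hs : t.toList.getLast? = some 's'
        · rw [List.foldl_cons, (pv_step_hit a b c d t).2.2.1 ((hchar 's').mpr hs), ih]
          simp [pvFirsts, hs]
        · by_cases hz : t.toList.getLast? = some 'z'
          · rw [List.foldl_cons, (pv_step_hit a b c d t).2.2.2 ((hchar 'z').mpr hz), ih]
            simp [pvFirsts, hz]
          · rw [List.foldl_cons,
              pv_step_miss a b c d t (fun h => hm ((hchar 'm').mp h)) (fun h => hp ((hchar 'p').mp h))
                (fun h => hs ((hchar 's').mp h)) (fun h => hz ((hchar 'z').mp h)), ih]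
            simp [pvFirsts, hm, hp, hs, hz]

-- count of a char in a flatMap of replicates over a duplicate-free key list
theorem pv_flat_count (ks : List Char) (hnd : ks.Nodup) (n : Char → Nat) (ch : Char) :
    (ks.flatMap (fun k => List.replicate (n k) k)).count ch = if ch ∈ ks then n ch else 0 := by
  induction ks with
  | nil => simp
  | cons k ks ih =>
    simp only [List.flatMap_cons, List.count_append, List.count_replicate,
      ih (List.nodup_cons.mp hnd).2, List.mem_cons]
    by_cases h : ch = k
    · subst h
      simp [(List.nodup_cons.mp hnd).1]
    · simp [h, Ne.symm h]

-- a flatMap of replicates over a strictly increasing key list is weakly increasing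
theorem pv_flat_pairwise (ks : List Char) (n : Char → Nat) (h : ks.Pairwise (· < ·)) :
    (ks.flatMap (fun k => List.replicate (n k) k)).Pairwise (· ≤ ·) := by
  induction ks with
  | nil => simp
  | cons k ks ih =>
    simp only [List.flatMap_cons]
    rw [List.pairwise_append]
    refine ⟨List.pairwise_replicate_of_refl, ih h.of_cons, ?_⟩
    intro a ha b hb
    rw [List.eq_of_mem_replicate ha]
    obtain ⟨k', hk', hbk⟩ := List.mem_flatMap.mp hb
    rw [List.eq_of_mem_replicate hbk]
    exact le_of_lt (List.rel_of_pairwise_cons h hk')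

-- string order restricted to nonempty strings is reflected by their first characters
theorem pv_first_le (s t : String) (hs : s.toList ≠ []) (ht : t.toList ≠ [])
    (h : s ≤ t) : s.toList.getD 0 ' ' ≤ t.toList.getD 0 ' ' := by
  rcases Std.le_iff_lt_or_eq.mp h with h | rfl
  · have h' := String.lt_iff_toList_lt.mp h
    obtain ⟨a, l, hsl⟩ := List.exists_cons_of_ne_nil hs
    obtain ⟨b, m, htl⟩ := List.exists_cons_of_ne_nil ht
    rw [hsl, htl] at h' ⊢
    rcases List.cons_lt_cons_iff.mp h' with h'' | ⟨rfl, -⟩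
    · simpa using le_of_lt h''
    · simp
  · exact le_refl _

-- CORE: counting-sort emission over a histogram of first characters = map-first over the sorted group
theorem pv_emit_eq (g : List String) (c : Char) (hg : ∀ t ∈ g, t.toList.getLast? = some c) :
    pvEmit (PySem.Dict.counter (g.map (fun t => t.toList.getD 0 ' '))) (String.ofList [c]) =
    pvGroupStr g c := by
  unfold pvEmit pvGroupStr
  have hne : ∀ t ∈ g, t.toList ≠ [] := by
    intro t ht h
    have := hg t ht
    rw [List.getLast?_eq_none_iff.mpr h] at this
    simp at this
  -- Step 1: map-first over the sorted group is the sorted list of first characters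
  have h1 : (PySem.List.sorted g (fun t => t) false).map (fun t => t.toList.getD 0 ' ') =
      PySem.List.sorted (g.map (fun t => t.toList.getD 0 ' ')) (fun x => x) false := by
    refine (PySem.List.sorted_id_eq_of_perm_of_pairwise _ _ ?_ ?_).symm
    · exact (PySem.List.sorted_perm g (fun t => t) false).map _
    · rw [List.pairwise_map]
      refine (PySem.List.sorted_pairwise g (fun t => t)).imp_of_mem ?_
      intro a b ha hb hab
      exact pv_first_le a b (hne a ((PySem.List.mem_sorted _ _ _ _).mp ha))
        (hne b ((PySem.List.mem_sorted _ _ _ _).mp hb)) hab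
  -- Step 2: the counting-sort emission is the sorted list of first characters
  set fs := g.map (fun t => t.toList.getD 0 ' ') with hfs
  have hks : (PySem.Dict.counter fs : PySem.Dict Char Int).keys = PySem.Set.ofList fs :=
    PySem.Dict.keys_counter fs
  have hklt : (PySem.List.sorted (PySem.Set.ofList fs) (fun x => x) false).Pairwise (· < ·) :=
    PySem.List.sorted_ofList_pairwise_lt fs
  have hknd : (PySem.List.sorted (PySem.Set.ofList fs) (fun x => x) false).Nodup :=
    hklt.imp ne_of_lt
  have h2 : ((PySem.List.sorted (PySem.Dict.counter fs : PySem.Dict Char Int).keys (fun x => x) false).flatMap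
        (fun ch => PySem.List.pyRepeat [ch] ((PySem.Dict.counter fs : PySem.Dict Char Int).getD ch 0))) =
      PySem.List.sorted fs (fun x => x) false := by
    have hrep : ∀ ch : Char,
        PySem.List.pyRepeat [ch] ((PySem.Dict.counter fs : PySem.Dict Char Int).getD ch 0) =
        List.replicate (fs.count ch) ch := by
      intro ch
      rw [PySem.Dict.getD_counter, PySem.List.pyRepeat_singleton, Int.toNat_natCast]
    rw [hks]
    refine (PySem.List.sorted_id_eq_of_perm_of_pairwise _ _ ?_ ?_).symm
    · refine List.perm_iff_count.mpr fun ch => ?_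
      rw [List.flatMap_congr (fun k _ => hrep k),
        pv_flat_count _ hknd (fun k => fs.count k) ch]
      by_cases hmem : ch ∈ fs
      · rw [if_pos ((PySem.List.mem_sorted _ _ _ _).mpr ((PySem.Set.mem_ofList _ _).mpr hmem))]
      · rw [if_neg (fun h => hmem ((PySem.Set.mem_ofList _ _).mp ((PySem.List.mem_sorted _ _ _ _).mp h))),
          List.count_eq_zero.mpr hmem]
    · rw [List.flatMap_congr (fun k _ => hrep k)]
      exact pv_flat_pairwise _ _ hklt
  rw [h1, ← h2]
  simp

-- the histogram is empty exactly on the empty group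
theorem pv_counter_size (xs : List Char) :
    ((PySem.Dict.counter xs : PySem.Dict Char Int).size ≠ 0) ↔ xs ≠ [] := by
  cases xs with
  | nil => simp [PySem.Dict.counter]
  | cons x xs =>
    simp only [ne_eq, reduceCtorEq, not_false_iff, iff_true]
    have : x ∈ (PySem.Dict.counter (x :: xs) : PySem.Dict Char Int).keys := by
      rw [PySem.Dict.keys_counter]
      simp [PySem.Set.mem_ofList]
    intro hsz
    have hkeys : (PySem.Dict.counter (x :: xs) : PySem.Dict Char Int).keys = [] := by
      have hi : (PySem.Dict.counter (x :: xs) : PySem.Dict Char Int).items = [] :=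
        List.length_eq_zero_iff.mp (by simpa [PySem.Dict.size] using hsz)
      simp [PySem.Dict.keys, hi]
    simp_all

-- looking up each suit's histogram in the literal result dict
theorem pv_getD_lit (a b c d : PySem.Dict Char Int) :
    ((PySem.Dict.ofList [("m",a),("p",b),("s",c),("z",d)]).getD "m" PySem.Dict.empty = a) ∧
    ((PySem.Dict.ofList [("m",a),("p",b),("s",c),("z",d)]).getD "p" PySem.Dict.empty = b) ∧
    ((PySem.Dict.ofList [("m",a),("p",b),("s",c),("z",d)]).getD "s" PySem.Dict.empty = c) ∧
    ((PySem.Dict.ofList [("m",a),("p",b),("s",c),("z",d)]).getD "z" PySem.Dict.empty = d) :=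
  ⟨rfl, rfl, rfl, rfl⟩

-- 'if c:' on a suit's histogram tests whether that suit's group is nonempty
theorem pv_size_iff (tiles : List String) (c : Char) :
    ((PySem.Dict.counter (pvFirsts tiles c) : PySem.Dict Char Int).size = 0) ↔
    tiles.filter (fun t : String => t.toList.getLast? == some c) = [] := by
  rw [← not_iff_not]
  refine (pv_counter_size _).trans ?_
  simp [pvFirsts]

-- each emitted suit part equals A's sorted-group part
theorem pv_part_eq (tiles : List String) (c : Char) :
    pvEmit (PySem.Dict.counter (pvFirsts tiles c)) (String.ofList [c]) =
    pvGroupStr (tiles.filter (fun t : String => t.toList.getLast? == some c)) c := by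
  unfold pvFirsts
  exact pv_emit_eq _ _ (fun t ht => by simpa using (List.mem_filter.mp ht).2)

-- the same, with each suit letter as the string literal appearing in the port
theorem pv_part_m (tiles : List String) : pvEmit (PySem.Dict.counter (pvFirsts tiles 'm')) "m" =
    pvGroupStr (tiles.filter (fun t : String => t.toList.getLast? == some 'm')) 'm' := pv_part_eq tiles 'm'
theorem pv_part_p (tiles : List String) : pvEmit (PySem.Dict.counter (pvFirsts tiles 'p')) "p" =
    pvGroupStr (tiles.filter (fun t : String => t.toList.getLast? == some 'p')) 'p' := pv_part_eq tiles 'p'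
theorem pv_part_s (tiles : List String) : pvEmit (PySem.Dict.counter (pvFirsts tiles 's')) "s" =
    pvGroupStr (tiles.filter (fun t : String => t.toList.getLast? == some 's')) 's' := pv_part_eq tiles 's'
theorem pv_part_z (tiles : List String) : pvEmit (PySem.Dict.counter (pvFirsts tiles 'z')) "z" =
    pvGroupStr (tiles.filter (fun t : String => t.toList.getLast? == some 'z')) 'z' := pv_part_eq tiles 'z' 

-- ===== VERDICT (by name: the statement is the Claim_ definition above) =====
theorem format_hand_spec : Claim_equal_format_hand := by
  unfold Claim_equal_format_hand
  intro tiles su _ _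
  unfold Spec_format_hand format_hand format_hand_alt
  by_cases h0 : tiles = []
  · rw [if_pos h0, if_pos h0]
  · rw [if_neg h0, if_neg h0]
    cases su with
    | true =>
      rw [show tile_to_unicode = tile_to_unicode_alt from funext pv_tile_eq]
      rfl
    | false =>
      simp only [Bool.false_eq_true, if_false]
      rw [show (fun t => PySem.Str.endswith t "m") = (fun t : String => t.toList.getLast? == some 'm') from
            funext fun t => pv_endswith_last t 'm',
          show (fun t => PySem.Str.endswith t "p") = (fun t : String => t.toList.getLast? == some 'p') from
            funext fun t => pv_endswith_last t 'p',
          show (fun t => PySem.Str.endswith t "s") = (fun t : String => t.toList.getLast? == some 's') from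
            funext fun t => pv_endswith_last t 's',
          show (fun t => PySem.Str.endswith t "z") = (fun t : String => t.toList.getLast? == some 'z') from
            funext fun t => pv_endswith_last t 'z',
          show (PySem.Dict.ofList [("m", PySem.Dict.empty), ("p", PySem.Dict.empty),
              ("s", PySem.Dict.empty), ("z", PySem.Dict.empty)] :
              PySem.Dict String (PySem.Dict Char Int)) =
            PySem.Dict.ofList [("m", (PySem.Dict.empty : PySem.Dict Char Int)),
              ("p", PySem.Dict.empty), ("s", PySem.Dict.empty), ("z", PySem.Dict.empty)] from rfl,
          pv_fold tiles PySem.Dict.empty PySem.Dict.empty PySem.Dict.empty PySem.Dict.empty]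
      simp only [← PySem.Dict.counter_eq_foldl]
      by_cases e1 : tiles.filter (fun t : String => t.toList.getLast? == some 'm') = [] <;>
        by_cases e2 : tiles.filter (fun t : String => t.toList.getLast? == some 'p') = [] <;>
          by_cases e3 : tiles.filter (fun t : String => t.toList.getLast? == some 's') = [] <;>
            by_cases e4 : tiles.filter (fun t : String => t.toList.getLast? == some 'z') = [] <;>
              simp [e1, e2, e3, e4, pv_getD_lit, pv_size_iff, pv_part_m, pv_part_p, pv_part_s, pv_part_z, List.foldl_cons]
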